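-- pv_equiv track=rewrite | github.com/robert-anderson/M7 | src/M7_lib/bilinear/make_rdm_spin_tracer.py | spatsigint_to_unique
-- ===== SOURCE A (Python) =====
-- def int_to_tup(n, rank):
--     return tuple((n>>i)&1 for i in range(rank))
--
-- def spatsigint_to_unique(i, rank):
--     # returns None if invalid
--     unique = [0]
--     last_t = 0
--     for t in int_to_tup(i, rank-1):
--         if t and last_t: return None
--         if t: unique.append(unique[-1])
--         else: unique.append(1+unique[-1])
--         last_t = t
--     return unique
-- ===== SOURCE B (Python) =====
-- def spatsigint_to_unique(i, rank):
--     # validity precheck on the bit list, then a prefix-sum build (no last_t state,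
--     # no early return inside the build, no self-referential unique[-1])
--     n = max(rank - 1, 0)
--     bits = [(i >> j) & 1 for j in range(n)]
--     if any(a and b for a, b in zip(bits, bits[1:])):
--         return None
--     out = []
--     s = 0
--     for j, t in enumerate(bits):
--         out.append(j - s)
--         s += t
--     out.append(n - s)
--     return out
-- ===== Notes on version B (the rewrite author's own statement) =====
-- stated objective: alternative
-- what changed: A's single stateful loop (early return, last_t flag, self-referential unique[-1] appends) is split into a bit-list extraction, a pairwise zip validity precheck, and a prefix-sum build out[j] = j - (ones seen so far).
import Mathlib
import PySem

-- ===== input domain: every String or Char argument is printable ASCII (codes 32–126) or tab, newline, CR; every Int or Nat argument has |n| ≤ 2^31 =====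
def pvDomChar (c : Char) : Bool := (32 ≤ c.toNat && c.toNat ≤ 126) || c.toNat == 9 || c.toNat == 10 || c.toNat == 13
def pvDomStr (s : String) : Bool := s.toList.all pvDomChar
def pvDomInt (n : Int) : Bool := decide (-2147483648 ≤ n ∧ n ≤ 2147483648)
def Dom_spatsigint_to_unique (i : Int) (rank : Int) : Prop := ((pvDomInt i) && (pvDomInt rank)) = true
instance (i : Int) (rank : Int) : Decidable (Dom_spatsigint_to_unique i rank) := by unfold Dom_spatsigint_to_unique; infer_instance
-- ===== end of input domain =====

-- B replaces A's single stateful loop by a zip-pair validity precheck plus a prefix-sum build (alternative decomposition, same cost).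

-- ===== PORT A =====
def pvIntToTup (n : Int) (rank : Int) : List Int :=
  (PySem.List.pyRange 0 rank 1).map (fun j => PySem.Int.band (n >>> j.toNat) 1)

def pvALoop : List Int → List Int → Int → Option (List Int)
  | [], unique, _ => some unique
  | t :: ts, unique, last_t =>
    if t ≠ 0 ∧ last_t ≠ 0 then none
    else if t ≠ 0 then pvALoop ts (unique ++ [unique.getLast!]) t
    else pvALoop ts (unique ++ [1 + unique.getLast!]) t

def spatsigint_to_unique (i : Int) (rank : Int) : Option (List Int) :=
  pvALoop (pvIntToTup i (rank - 1)) [0] 0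

-- ===== PORT B =====
def pvBBuild : List (Int × Int) → List Int → Int → List Int × Int
  | [], out, s => (out, s)
  | (j, t) :: rest, out, s => pvBBuild rest (out ++ [j - s]) (s + t)

def spatsigint_to_unique_alt (i : Int) (rank : Int) : Option (List Int) :=
  let n : Int := max (rank - 1) 0
  let bits : List Int := (PySem.List.pyRange 0 n 1).map (fun j => PySem.Int.band (i >>> j.toNat) 1)
  if (bits.zip (bits.drop 1)).any (fun p => decide (p.1 ≠ 0) && decide (p.2 ≠ 0)) then none
  else
    let os := pvBBuild (PySem.List.enumerate bits 0) [] 0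
    some (os.1 ++ [n - os.2])

-- ===== PRECONDITION & SPEC =====
def Spec_spatsigint_to_unique (i : Int) (rank : Int) (out : Option (List Int)) : Prop := out = spatsigint_to_unique_alt i rank
instance (i : Int) (rank : Int) (out : Option (List Int)) : Decidable (Spec_spatsigint_to_unique i rank out) := by unfold Spec_spatsigint_to_unique; infer_instance

-- ===== CLAIM (what is proved, stated in full; the proofs are below) =====
def Claim_equal_spatsigint_to_unique : Prop := ∀ (i : Int) (rank : Int), Dom_spatsigint_to_unique i rank → Spec_spatsigint_to_unique i rank (spatsigint_to_unique i rank)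

-- ===== LEMMAS AND PROOFS =====

-- "two consecutive nonzero entries" as A's loop sees it (last_t threaded through)
def pvConsec : Int → List Int → Bool
  | _, [] => false
  | last, t :: ts => (decide (t ≠ 0) && decide (last ≠ 0)) || pvConsec t ts

lemma pv_getLast!_concat (l : List Int) (a : Int) : (l ++ [a]).getLast! = a := by
  induction l with
  | nil => rfl
  | cons x xs ih =>
    cases xs with
    | nil => rfl
    | cons y ys => simpa [List.getLast!] using ih

lemma pv_bits01 (x : Int) : PySem.Int.band x 1 = 0 ∨ PySem.Int.band x 1 = 1 := by
  have h := PySem.Int.band_one x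
  have h1 := PySem.Int.mod_nonneg x (b := 2) (by omega)
  have h2 := PySem.Int.mod_lt x (b := 2) (by omega)
  omega

lemma pv_aloop_eq (bits : List Int) : ∀ (acc : List Int) (last : Int),
    (∀ b ∈ bits, b = 0 ∨ b = 1) →
    pvALoop bits acc last =
      if pvConsec last bits then none
      else some (acc ++ (List.range bits.length).map
        (fun k : Nat => acc.getLast! + ((k : Int) + 1) - (bits.take (k + 1)).sum)) := by
  induction bits with
  | nil => intro acc last _; simp [pvALoop, pvConsec]
  | cons t ts ih =>
    intro acc last h01
    have ht : t = 0 ∨ t = 1 := h01 t (by simp)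
    have hts : ∀ b ∈ ts, b = 0 ∨ b = 1 := fun b hb => h01 b (by simp [hb])
    by_cases hb : t ≠ 0 ∧ last ≠ 0
    · simp [pvALoop, pvConsec, hb.1, hb.2]
    · have hcons : pvConsec last (t :: ts) = pvConsec t ts := by
        simp only [pvConsec]
        rcases not_and_or.mp hb with h | h
        · simp [not_not.mp h]
        · simp [not_not.mp h]
      have hstep : pvALoop (t :: ts) acc last
          = pvALoop ts (acc ++ [acc.getLast! + 1 - t]) t := by
        rcases ht with h0 | h1
        · subst h0; simp [pvALoop, add_comm]
        · have hlast : last = 0 := by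
            rcases not_and_or.mp hb with h | h
            · omega
            · exact not_not.mp h
          subst h1; subst hlast; norm_num [pvALoop]
      rw [hstep, ih _ t hts, hcons]
      by_cases hc : pvConsec t ts = true
      · simp [hc]
      · simp only [hc, Bool.false_eq_true, if_false]
        rw [pv_getLast!_concat, List.append_assoc]
        rw [List.length_cons, List.range_succ_eq_map, List.map_cons, List.map_map]
        simp only [List.singleton_append, Option.some.injEq, List.append_right_inj,
          List.cons.injEq]
        constructor
        · simp [List.take_succ_cons]
        · apply List.map_congr_left
          intro k hk
          simp only [Function.comp_apply, List.take_succ_cons, List.sum_cons]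
          push_cast
          ring

lemma pv_bbuild_eq (bits : List Int) : ∀ (j0 s0 : Int) (out : List Int),
    pvBBuild (PySem.List.enumerate bits j0) out s0 =
      (out ++ (List.range bits.length).map
        (fun k : Nat => j0 + (k : Int) - (s0 + (bits.take k).sum)), s0 + bits.sum) := by
  induction bits with
  | nil => intro j0 s0 out; simp [PySem.List.enumerate_nil, pvBBuild]
  | cons t ts ih =>
    intro j0 s0 out
    rw [PySem.List.enumerate_cons]
    simp only [pvBBuild]
    rw [ih (j0 + 1) (s0 + t) (out ++ [j0 - s0])]
    simp only [Prod.mk.injEq]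
    constructor
    · rw [List.append_assoc]
      rw [List.length_cons, List.range_succ_eq_map, List.map_cons, List.map_map]
      simp only [List.singleton_append, List.append_right_inj, List.cons.injEq]
      constructor
      · simp
      · apply List.map_congr_left
        intro k hk
        simp only [Function.comp_apply, List.take_succ_cons, List.sum_cons]
        push_cast
        ring
    · simp; ring

lemma pv_consec_eq_zip (bits : List Int) : ∀ (last : Int),
    pvConsec last bits
      = ((last :: bits).zip bits).any (fun p => decide (p.1 ≠ 0) && decide (p.2 ≠ 0)) := by
  induction bits with
  | nil => intro last; simp [pvConsec]
  | cons t ts ih =>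
    intro last
    simp only [pvConsec, List.zip_cons_cons, List.any_cons, ih t]
    rw [Bool.and_comm]

lemma pv_consec_zero (bits : List Int) :
    pvConsec 0 bits
      = (bits.zip (bits.drop 1)).any (fun p => decide (p.1 ≠ 0) && decide (p.2 ≠ 0)) := by
  cases bits with
  | nil => rfl
  | cons b bs =>
    rw [pv_consec_eq_zip]
    simp

lemma pv_final (bits : List Int) :
    ((0:Int) :: (List.range bits.length).map
        (fun k : Nat => (0:Int) + ((k:Int) + 1) - (bits.take (k + 1)).sum))
      = ((List.range bits.length).map
          (fun k : Nat => (0:Int) + (k:Int) - (0 + (bits.take k).sum)))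
        ++ [(bits.length : Int) - (0 + bits.sum)] := by
  trans ((List.range (bits.length + 1)).map (fun k : Nat => (k:Int) - (bits.take k).sum))
  · rw [List.range_succ_eq_map, List.map_cons, List.map_map]
    simp only [List.cons.injEq]
    refine ⟨by simp, ?_⟩
    apply List.map_congr_left
    intro k hk
    simp only [Function.comp_apply, Nat.succ_eq_add_one]
    push_cast
    ring
  · rw [List.range_succ, List.map_append, List.map_singleton, List.take_length]
    congr 1
    · apply List.map_congr_left
      intro k hk
      ring
    · congr 1
      ring

-- ===== VERDICT (by name: the statement is the Claim_ definition above) =====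
theorem spatsigint_to_unique_spec : Claim_equal_spatsigint_to_unique := by
  intro i rank _
  unfold Spec_spatsigint_to_unique
  simp only [spatsigint_to_unique, spatsigint_to_unique_alt, pvIntToTup]
  have hn0 : (0:Int) ≤ max (rank - 1) 0 := le_max_right _ _
  have hrange : PySem.List.pyRange 0 (rank - 1) 1 = PySem.List.pyRange 0 (max (rank - 1) 0) 1 := by
    rcases le_or_gt (rank - 1) 0 with h | h
    · rw [PySem.List.pyRange_one_eq_nil h,
        PySem.List.pyRange_one_eq_nil (le_of_eq (max_eq_right h))]
    · rw [max_eq_left (by omega)]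
  rw [hrange]
  set n : Int := max (rank - 1) 0 with hn
  set bits : List Int :=
    (PySem.List.pyRange 0 n 1).map (fun j => PySem.Int.band (i >>> j.toNat) 1) with hbits
  have h01 : ∀ b ∈ bits, b = 0 ∨ b = 1 := by
    intro b hb
    rw [hbits] at hb
    simp only [List.mem_map] at hb
    obtain ⟨j, _, rfl⟩ := hb
    exact pv_bits01 _
  have hlen : (bits.length : Int) = n := by
    rw [hbits]
    simp [PySem.List.length_pyRange_one]
    omega
  rw [pv_aloop_eq bits [0] 0 h01, pv_bbuild_eq bits 0 0 [], ← pv_consec_zero bits]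
  by_cases hc : pvConsec 0 bits = true
  · simp [hc]
  · simp only [hc, Bool.false_eq_true, if_false,
      show ([0] : List Int).getLast! = (0:Int) from rfl,
      List.singleton_append, List.nil_append]
    rw [← hlen]
    exact congrArg some (pv_final bits)
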